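-- pv_equiv track=rewrite | github.com/pypi-data/pypi-mirror-392 | packages/slimschema/slimschema-0.0.0.dev3.tar.gz/slimschema-0.0.0.dev3/src/slimschema/parser.py | _extract_comments
-- ===== SOURCE A (Python) =====
-- def _extract_comments(yaml_str: str) -> dict[str, str]:
--     """Extract inline comments for fields.
--
--     Args:
--         yaml_str: YAML string
--
--     Returns:
--         Dictionary mapping field names to comments
--
--     Examples:
--         >>> _extract_comments("name: str  # Full name\\nage: int")
--         {'name': 'Full name'}
--     """
--     comments = {}
--
--     for line in yaml_str.split("\n"):
--         if "#" not in line: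
--             continue
--
--         parts = line.split("#", 1)
--         if len(parts) != 2:
--             continue
--
--         key_part = parts[0].strip()
--         comment = parts[1].strip()
--
--         if ":" not in key_part:
--             continue
--
--         field = key_part.split(":")[0].strip().rstrip("?")
--         if field and comment:
--             comments[field] = comment
--
--     return comments
-- ===== SOURCE B (Python) =====
-- def _extract_comments(yaml_str: str) -> dict[str, str]:
--     """Single character-level pass: accumulate the key text and, after the
--     first '#' of a line, the comment text; flush at each newline."""
--     comments = {}
--     key = ""
--     comment = None  # None until a '#' has been seen on the current line
--
--     for ch in yaml_str + "\n":
--         if ch == "\n":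
--             if comment is not None:
--                 key_part = key.strip()
--                 text = comment.strip()
--                 if ":" in key_part:
--                     field = key_part.split(":")[0].strip().rstrip("?")
--                     if field and text:
--                         comments[field] = text
--             key = ""
--             comment = None
--         elif comment is not None:
--             comment += ch
--         elif ch == "#":
--             comment = ""
--         else:
--             key += ch
--
--     return comments
-- ===== Notes on version B (the rewrite author's own statement) =====
-- stated objective: alternative
-- what changed: A splits the string into lines and re-splits each line at the comment marker; B makes a single character-level pass over the whole string, accumulating key and comment buffers and flushing them at every line end.
import Mathlib
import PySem

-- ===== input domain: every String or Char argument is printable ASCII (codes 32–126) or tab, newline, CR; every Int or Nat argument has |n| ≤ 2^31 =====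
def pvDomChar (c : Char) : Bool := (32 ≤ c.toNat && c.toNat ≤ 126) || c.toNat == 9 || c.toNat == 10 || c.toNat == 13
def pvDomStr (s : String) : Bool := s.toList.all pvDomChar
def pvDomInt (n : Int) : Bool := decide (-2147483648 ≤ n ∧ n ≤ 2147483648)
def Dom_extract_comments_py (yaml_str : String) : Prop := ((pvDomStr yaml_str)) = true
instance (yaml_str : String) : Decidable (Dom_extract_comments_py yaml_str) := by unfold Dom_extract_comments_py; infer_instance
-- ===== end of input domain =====

-- B replaces A's split-into-lines-then-split-each-line parser by a single character-level
-- scan with key/comment buffers flushed at each line end (objective: alternative).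

-- ===== PORT A =====
-- hand port of Python's s.rstrip("?") (PySem has rstrip only for whitespace): exact —
-- drops the trailing run of '?' characters.
def pyRstripQ (s : List Char) : List Char := (s.reverse.dropWhile (· == '?')).reverse

-- the body of A's `for line in yaml_str.split("\n")` loop
def pyLineStep (comments : PySem.Dict (List Char) (List Char)) (line : List Char) :
    PySem.Dict (List Char) (List Char) :=
  if PySem.Chars.isIn ['#'] line = false then comments
  else
    let parts := (PySem.Chars.splitMax? line ['#'] 1).getD []  -- never none: sep "#" ≠ ""
    if parts.length ≠ 2 then comments
    else
      let key_part := PySem.Chars.strip (parts.getD 0 [])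
      let comment := PySem.Chars.strip (parts.getD 1 [])
      if PySem.Chars.isIn [':'] key_part = false then comments
      else
        let field := pyRstripQ (PySem.Chars.strip ((PySem.Chars.splitOn key_part [':']).getD 0 []))
        if field ≠ [] ∧ comment ≠ [] then comments.insert field comment else comments

def extract_comments_py (yaml_str : String) : List (String × String) :=
  (((PySem.Chars.splitOn yaml_str.toList ['\n']).foldl pyLineStep PySem.Dict.empty).items).map
    (fun p => (String.ofList p.1, String.ofList p.2))

-- ===== PORT B =====
-- flush of one line's buffers (key = chars before the first '#', com = chars after it)
def altFlush (d : PySem.Dict (List Char) (List Char)) (key com : List Char) :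
    PySem.Dict (List Char) (List Char) :=
  let key_part := PySem.Chars.strip key
  let text := PySem.Chars.strip com
  if PySem.Chars.isIn [':'] key_part = false then d
  else
    let field := pyRstripQ (PySem.Chars.strip ((PySem.Chars.splitOn key_part [':']).getD 0 []))
    if field ≠ [] ∧ text ≠ [] then d.insert field text else d

-- B's single pass over the characters: `for ch in yaml_str + "\n"`
def altScan (cs : List Char) (key : List Char) (com : Option (List Char))
    (d : PySem.Dict (List Char) (List Char)) : PySem.Dict (List Char) (List Char) :=
  match cs with
  | [] => d
  | c :: t =>
    if c = '\n' then
      altScan t [] none (match com with | none => d | some f => altFlush d key f)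
    else
      match com with
      | some f => altScan t key (some (f ++ [c])) d
      | none =>
        if c = '#' then altScan t key (some []) d
        else altScan t (key ++ [c]) none d

def extract_comments_py_alt (yaml_str : String) : List (String × String) :=
  ((altScan (yaml_str.toList ++ ['\n']) [] none PySem.Dict.empty).items).map
    (fun p => (String.ofList p.1, String.ofList p.2))

-- ===== PRECONDITION & SPEC =====
def Spec_extract_comments_py (yaml_str : String) (out : List (String × String)) : Prop := out = extract_comments_py_alt yaml_str
instance (yaml_str : String) (out : List (String × String)) : Decidable (Spec_extract_comments_py yaml_str out) := by unfold Spec_extract_comments_py; infer_instance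

-- ===== CLAIM (what is proved, stated in full; the proofs are below) =====
def Claim_equal_extract_comments_py : Prop := ∀ (yaml_str : String), Dom_extract_comments_py yaml_str → Spec_extract_comments_py yaml_str (extract_comments_py yaml_str)

-- ===== LEMMAS AND PROOFS =====

-- plain structural split on a single character, used to characterise both traversals
def splitCh (c : Char) : List Char → List (List Char)
  | [] => [[]]
  | a :: t =>
    if a = c then [] :: splitCh c t
    else
      match splitCh c t with
      | [] => [[a]]  -- unreachable: splitCh is never []
      | h :: r => (a :: h) :: r

theorem splitCh_ne_nil (c : Char) : ∀ (l : List Char), splitCh c l ≠ [] := by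
  intro l
  induction l with
  | nil => simp [splitCh]
  | cons a t ih =>
    simp only [splitCh]
    split_ifs
    · simp
    · cases hsp : splitCh c t with
      | nil => exact absurd hsp ih
      | cons h r => simp

theorem headD_cons_tail {α : Type} (l : List α) (d : α) (h : l ≠ []) :
    l.headD d :: l.tail = l := by
  cases l with
  | nil => exact absurd rfl h
  | cons a t => rfl

theorem splitCh_cons_ne {c a : Char} (t : List Char) (h : a ≠ c) :
    splitCh c (a :: t)
      = (a :: (splitCh c t).headD []) :: (splitCh c t).tail := by
  simp only [splitCh, if_neg h]
  cases hsp : splitCh c t with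
  | nil => exact absurd hsp (splitCh_ne_nil c t)
  | cons hd r => rfl

theorem splitOn_go_eq (c : Char) :
    ∀ (fuel : Nat) (l cur : List Char) (acc : List (List Char)), l.length ≤ fuel →
    PySem.Chars.splitOn.go [c] fuel l cur acc
      = acc.reverse ++ (cur.reverse ++ (splitCh c l).headD []) :: (splitCh c l).tail := by
  intro fuel
  induction fuel with
  | zero =>
    intro l cur acc h
    have hl : l = [] := List.length_eq_zero_iff.mp (Nat.le_zero.mp h)
    subst hl
    simp [PySem.Chars.splitOn.go, splitCh]
  | succ fuel ih =>
    intro l cur acc h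
    cases l with
    | nil => simp [PySem.Chars.splitOn.go, splitCh]
    | cons a rest =>
      by_cases hc : a = c
      · have hpre : List.isPrefixOf [c] (a :: rest) = true := by
          simp [List.isPrefixOf, hc]
        rw [show PySem.Chars.splitOn.go [c] (fuel + 1) (a :: rest) cur acc
              = PySem.Chars.splitOn.go [c] fuel (List.drop 1 (a :: rest)) []
                  (cur.reverse :: acc) by
              simp [PySem.Chars.splitOn.go, hpre]]
        rw [List.drop_one, List.tail_cons,
            ih rest [] (cur.reverse :: acc) (by simpa using Nat.le_of_succ_le_succ h)]
        rw [show splitCh c (a :: rest) = [] :: splitCh c rest by simp [splitCh, hc]]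
        rw [show ([] : List Char).reverse ++ (splitCh c rest).headD [] = (splitCh c rest).headD [] by simp]
        rw [headD_cons_tail _ _ (splitCh_ne_nil c rest)]
        simp
      · have hpre : List.isPrefixOf [c] (a :: rest) = false := by
          simp [List.isPrefixOf]; exact fun hh => hc hh.symm
        rw [show PySem.Chars.splitOn.go [c] (fuel + 1) (a :: rest) cur acc
              = PySem.Chars.splitOn.go [c] fuel rest (a :: cur) acc by
              simp [PySem.Chars.splitOn.go, hpre]]
        rw [ih rest (a :: cur) acc (by simpa using Nat.le_of_succ_le_succ h)]
        rw [splitCh_cons_ne rest hc]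
        simp

theorem splitOn_eq_splitCh (c : Char) (l : List Char) :
    PySem.Chars.splitOn l [c] = splitCh c l := by
  unfold PySem.Chars.splitOn
  rw [splitOn_go_eq c (l.length + 1) l [] [] (by omega)]
  simp only [List.reverse_nil, List.nil_append]
  exact headD_cons_tail _ _ (splitCh_ne_nil c l)

theorem splitCh_of_not_mem {c : Char} {l : List Char} (h : c ∉ l) : splitCh c l = [l] := by
  induction l with
  | nil => rfl
  | cons a t ih =>
    simp only [List.mem_cons, not_or] at h
    rw [splitCh_cons_ne t (fun he => h.1 he.symm), ih h.2]
    rfl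

theorem splitCh_append_cons {c : Char} {l : List Char} (t : List Char) (h : c ∉ l) :
    splitCh c (l ++ c :: t) = l :: splitCh c t := by
  induction l with
  | nil => simp [splitCh]
  | cons a l' ih =>
    simp only [List.mem_cons, not_or] at h
    rw [List.cons_append, splitCh_cons_ne _ (fun he => h.1 he.symm), ih h.2]
    simp

theorem isIn_singleton_iff (c : Char) (s : List Char) :
    PySem.Chars.isIn [c] s = true ↔ c ∈ s := by
  rw [PySem.Chars.isIn_iff_infix]
  constructor
  · rintro ⟨p, q, rfl⟩; simp
  · intro h
    obtain ⟨p, q, rfl⟩ := List.append_of_mem h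
    exact ⟨p, q, by simp⟩

theorem goMax_zero (c : Char) (fuel : Nat) (l cur : List Char) (acc : List (List Char)) :
    PySem.Chars.splitOnMax.go [c] fuel 0 l cur acc = acc.reverse ++ [cur.reverse ++ l] := by
  cases fuel with
  | zero => simp [PySem.Chars.splitOnMax.go]
  | succ fuel =>
    cases l with
    | nil => simp [PySem.Chars.splitOnMax.go]
    | cons a rest => simp [PySem.Chars.splitOnMax.go]

theorem goMax_one (c : Char) (suf : List Char) :
    ∀ (kb : List Char) (fuel : Nat) (cur : List Char) (acc : List (List Char)),
      c ∉ kb → kb.length + suf.length + 1 ≤ fuel →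
      PySem.Chars.splitOnMax.go [c] fuel 1 (kb ++ c :: suf) cur acc
        = acc.reverse ++ [cur.reverse ++ kb, suf] := by
  intro kb
  induction kb with
  | nil =>
    intro fuel cur acc _ hf
    cases fuel with
    | zero => omega
    | succ fuel =>
      have hpre : List.isPrefixOf [c] (c :: suf) = true := by simp [List.isPrefixOf]
      rw [show PySem.Chars.splitOnMax.go [c] (fuel + 1) 1 ([] ++ c :: suf) cur acc
            = PySem.Chars.splitOnMax.go [c] fuel 0 (List.drop 1 (c :: suf)) []
                (cur.reverse :: acc) by
            simp [PySem.Chars.splitOnMax.go, hpre]]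
      rw [List.drop_one, List.tail_cons, goMax_zero]
      simp
  | cons a kb' ih =>
    intro fuel cur acc hm hf
    simp only [List.mem_cons, not_or] at hm
    cases fuel with
    | zero => omega
    | succ fuel =>
      have hpre : List.isPrefixOf [c] (a :: (kb' ++ c :: suf)) = false := by
        simp [List.isPrefixOf]; exact hm.1
      rw [show PySem.Chars.splitOnMax.go [c] (fuel + 1) 1 ((a :: kb') ++ c :: suf) cur acc
            = PySem.Chars.splitOnMax.go [c] fuel 1 (kb' ++ c :: suf) (a :: cur) acc by
            simp [PySem.Chars.splitOnMax.go, hpre]]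
      rw [ih fuel (a :: cur) acc hm.2 (by simp only [List.length_cons] at hf; omega)]
      simp

theorem splitMax_hash (kb suf : List Char) (h : '#' ∉ kb) :
    PySem.Chars.splitMax? (kb ++ '#' :: suf) ['#'] 1 = some [kb, suf] := by
  unfold PySem.Chars.splitMax? PySem.Chars.splitOnMax
  rw [if_neg (by simp), if_neg (by norm_num)]
  rw [show ((1 : Int)).toNat = 1 from rfl]
  rw [goMax_one '#' suf kb ((kb ++ '#' :: suf).length + 1) [] [] h (by simp only [List.length_append, List.length_cons]; omega)]
  simp

theorem lineStep_no_hash (d : PySem.Dict (List Char) (List Char)) (line : List Char)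
    (h : '#' ∉ line) : pyLineStep d line = d := by
  have : PySem.Chars.isIn ['#'] line = false := by
    cases hb : PySem.Chars.isIn ['#'] line with
    | false => rfl
    | true => exact absurd ((isIn_singleton_iff _ _).mp hb) h
  simp [pyLineStep, this]

theorem lineStep_hash (d : PySem.Dict (List Char) (List Char)) (kb suf : List Char)
    (h : '#' ∉ kb) : pyLineStep d (kb ++ '#' :: suf) = altFlush d kb suf := by
  have h1 : PySem.Chars.isIn ['#'] (kb ++ '#' :: suf) = true :=
    (isIn_singleton_iff _ _).mpr (by simp)
  simp only [pyLineStep, h1, Bool.true_eq_false, if_false, splitMax_hash kb suf h,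
    Option.getD_some, List.length_cons, List.length_nil, ne_eq]
  simp [altFlush]

-- the line currently being scanned, reconstructed from B's buffers
def lineOf (kb : List Char) : Option (List Char) → List Char
  | none => kb
  | some f => kb ++ '#' :: f

theorem flushOpt_eq (d : PySem.Dict (List Char) (List Char)) (kb : List Char)
    (com : Option (List Char)) (h : '#' ∉ kb) :
    (match com with | none => d | some f => altFlush d kb f) = pyLineStep d (lineOf kb com) := by
  cases com with
  | none => exact (lineStep_no_hash d kb h).symm
  | some f => exact (lineStep_hash d kb f h).symm

theorem nl_not_mem_lineOf {kb : List Char} {com : Option (List Char)}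
    (h1 : '\n' ∉ kb) (h2 : ∀ f, com = some f → '\n' ∉ f) : '\n' ∉ lineOf kb com := by
  cases com with
  | none => exact h1
  | some f =>
    simp only [lineOf, List.mem_append, List.mem_cons, not_or]
    exact ⟨h1, by decide, h2 f rfl⟩

theorem scan_eq (cs : List Char) :
    ∀ (kb : List Char) (com : Option (List Char)) (d : PySem.Dict (List Char) (List Char)),
      '#' ∉ kb → '\n' ∉ kb → (∀ f, com = some f → '\n' ∉ f) →
      altScan (cs ++ ['\n']) kb com d
        = (splitCh '\n' (lineOf kb com ++ cs)).foldl pyLineStep d := by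
  induction cs with
  | nil =>
    intro kb com d hh hn hc
    rw [List.nil_append, List.append_nil,
        splitCh_of_not_mem (nl_not_mem_lineOf hn hc)]
    simp only [altScan, List.foldl_cons, List.foldl_nil]
    exact flushOpt_eq d kb com hh
  | cons c cs' ih =>
    intro kb com d hh hn hc
    rw [List.cons_append]
    by_cases hnl : c = '\n'
    · subst hnl
      cases com with
      | none =>
        rw [show altScan ('\n' :: (cs' ++ ['\n'])) kb none d
              = altScan (cs' ++ ['\n']) [] none d by simp [altScan]]
        rw [ih [] none d (by simp) (by simp) (by simp)]
        have hsp : splitCh '\n' (lineOf kb none ++ '\n' :: cs') = kb :: splitCh '\n' cs' := by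
          simp only [lineOf]; exact splitCh_append_cons cs' hn
        rw [hsp, List.foldl_cons, lineStep_no_hash d kb hh]
        simp [lineOf]
      | some f =>
        rw [show altScan ('\n' :: (cs' ++ ['\n'])) kb (some f) d
              = altScan (cs' ++ ['\n']) [] none (altFlush d kb f) by simp [altScan]]
        rw [ih [] none _ (by simp) (by simp) (by simp)]
        have hsp : splitCh '\n' (lineOf kb (some f) ++ '\n' :: cs')
            = (kb ++ '#' :: f) :: splitCh '\n' cs' := by
          simp only [lineOf]
          exact splitCh_append_cons cs' (nl_not_mem_lineOf hn hc)
        rw [hsp, List.foldl_cons, lineStep_hash d kb f hh]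
        simp [lineOf]
    · cases com with
      | some f =>
        rw [show altScan (c :: (cs' ++ ['\n'])) kb (some f) d
              = altScan (cs' ++ ['\n']) kb (some (f ++ [c])) d by
              simp [altScan, hnl]]
        rw [ih kb (some (f ++ [c])) d hh hn
              (by intro g hg; simp at hg; subst hg
                  simp only [List.mem_append, List.mem_cons, not_or]
                  exact ⟨hc f rfl, fun he => hnl he.symm, by simp⟩)]
        have : lineOf kb (some (f ++ [c])) ++ cs' = lineOf kb (some f) ++ c :: cs' := by
          simp [lineOf]
        rw [this]
      | none =>
        by_cases hhash : c = '#'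
        · subst hhash
          rw [show altScan ('#' :: (cs' ++ ['\n'])) kb none d
                = altScan (cs' ++ ['\n']) kb (some []) d by
                simp [altScan, hnl]]
          rw [ih kb (some []) d hh hn (by intro g hg; simp at hg; subst hg; simp)]
          have : lineOf kb (some []) ++ cs' = lineOf kb none ++ '#' :: cs' := by
            simp [lineOf]
          rw [this]
        · rw [show altScan (c :: (cs' ++ ['\n'])) kb none d
                = altScan (cs' ++ ['\n']) (kb ++ [c]) none d by
                simp [altScan, hnl, hhash]]
          rw [ih (kb ++ [c]) none d
                (by simp only [List.mem_append, List.mem_cons, not_or]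
                    exact ⟨hh, fun he => hhash he.symm, by simp⟩)
                (by simp only [List.mem_append, List.mem_cons, not_or]
                    exact ⟨hn, fun he => hnl he.symm, by simp⟩)
                (by simp)]
          have : lineOf (kb ++ [c]) none ++ cs' = lineOf kb none ++ c :: cs' := by
            simp [lineOf]
          rw [this]

-- ===== VERDICT (by name: the statement is the Claim_ definition above) =====
theorem extract_comments_py_spec : Claim_equal_extract_comments_py := by
  intro yaml_str _
  unfold Spec_extract_comments_py extract_comments_py extract_comments_py_alt
  rw [scan_eq yaml_str.toList [] none PySem.Dict.empty (by simp) (by simp) (by simp),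
      splitOn_eq_splitCh]
  rfl
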